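-- pv_equiv track=rewrite | github.com/SevgiNurKARA/data-science-learning-path | 03_machine_learning/preprocessing_from_scratch/discretization/equal_width.py | discretize_data
-- ===== SOURCE A (Python) =====
-- def discretize_data(data, k):
--     if k <= 0:
--         raise ValueError("k must be a positive integer greater than 0.")
--     if k > len(data):
--         raise ValueError(f"k cannot be larger than the number of data points ({len(data)}).")
--
--     data_sorted = sorted(data)
--
--     n = len(data)
--     interval = n // k
--
--     bin_edges = [data_sorted[0]]
--     for i in range(1, k):
--         split_point = data_sorted[i * interval - 1]
--         bin_edges.append(split_point)
--     bin_edges.append(data_sorted[-1])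
--
--     discretized_data = []
--     for value in data:
--         for j in range(len(bin_edges) - 1):
--             if bin_edges[j] <= value <= bin_edges[j + 1]:
--                 discretized_data.append(j + 1)
--                 break
--
--     return discretized_data, bin_edges
-- ===== SOURCE B (Python) =====
-- def discretize_data(data, k):
--     if k <= 0:
--         raise ValueError("k must be a positive integer greater than 0.")
--     if k > len(data):
--         raise ValueError(f"k cannot be larger than the number of data points ({len(data)}).")
--
--     data_sorted = sorted(data)
--     n = len(data)
--     interval = n // k
--
--     bin_edges = [data_sorted[0]]
--     for i in range(1, k):
--         bin_edges.append(data_sorted[i * interval - 1])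
--     bin_edges.append(data_sorted[-1])
--
--     # sort-then-single-sweep assignment: visit values in ascending order,
--     # advance one edge pointer, scatter bins back to the original positions
--     order = sorted(range(n), key=lambda i: data[i])
--     bins = [0] * n
--     b = 0
--     for i in order:
--         v = data[i]
--         while b < len(bin_edges) - 2 and v > bin_edges[b + 1]:
--             b += 1
--         bins[i] = b + 1
--     return bins, bin_edges
-- ===== Notes on version B (the rewrite author's own statement) =====
-- stated objective: faster
-- what changed: The per-value first-match scan over all bin edges is replaced by sorting the indices by value and sweeping a single monotone edge pointer over the ascending values, scattering bin numbers back to the original positions.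
import Mathlib
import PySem

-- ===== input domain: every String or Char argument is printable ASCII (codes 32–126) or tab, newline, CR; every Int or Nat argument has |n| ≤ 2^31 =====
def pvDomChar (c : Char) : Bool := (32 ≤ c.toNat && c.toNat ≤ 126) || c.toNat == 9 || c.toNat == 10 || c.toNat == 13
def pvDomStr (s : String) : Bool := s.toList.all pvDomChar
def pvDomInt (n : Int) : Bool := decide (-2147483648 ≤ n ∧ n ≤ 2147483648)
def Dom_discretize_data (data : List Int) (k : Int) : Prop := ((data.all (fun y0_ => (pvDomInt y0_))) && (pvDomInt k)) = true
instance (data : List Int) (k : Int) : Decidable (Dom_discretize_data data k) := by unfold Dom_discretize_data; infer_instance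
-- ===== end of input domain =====

-- B replaces A's per-value linear scan over the bin edges by a sort-then-single-sweep
-- assignment (sort the indices by value, advance one edge pointer, scatter back);
-- objective: faster (assignment phase O(n·k) → O(n log n + n + k); measured faster in a timing run).

-- ===== PORT A =====
-- edge-building phase, identical in both Pythons (shared helper):
-- data_sorted = sorted(data); interval = n // k; edges = [ds[0]] + [ds[i*interval-1] for i in range(1,k)] + [ds[-1]]
-- (pyGetD's default is never read: under Pre_ every index is in range)
def dd_edges (data : List Int) (k : Int) : List Int :=
  let ds := PySem.List.sorted data (fun x => x) false
  let n : Int := data.length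
  let interval := PySem.Int.floordiv n k
  ((PySem.List.pyRange 1 k 1).foldl
      (fun acc i => acc ++ [PySem.List.pyGetD ds (i * interval - 1) 0])
      [PySem.List.pyGetD ds 0 0]) ++ [PySem.List.pyGetD ds (-1) 0]

-- inner loop `for j in range(len(bin_edges)-1): if edges[j] <= value <= edges[j+1]: append(j+1); break`
-- as the obvious structural recursion over the same edge windows, same tests in the same order
def dd_scanA (v : Int) (j : Int) : List Int → Option Int
  | e0 :: e1 :: rest => if e0 ≤ v ∧ v ≤ e1 then some (j + 1) else dd_scanA v (j + 1) (e1 :: rest)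
  | _ => none

def discretize_data (data : List Int) (k : Int) : List Int × List Int :=
  let bin_edges := dd_edges data k
  let discretized := data.foldl (fun acc v =>
      match dd_scanA v 0 bin_edges with
      | some r => acc ++ [r]
      | none => acc) ([] : List Int)
  (discretized, bin_edges)

-- ===== PORT B =====
-- `while b < len(bin_edges) - 2 and v > bin_edges[b+1]: b += 1` (fuel only makes the while total;
-- b can rise at most len(bin_edges) times per call, so fuel = len(bin_edges) is never exhausted)
def dd_adv (edges : List Int) (v : Int) : Nat → Nat → Nat
  | b, fuel + 1 =>
      if (b : Int) < PySem.List.len edges - 2 ∧ PySem.List.pyGetD edges ((b : Int) + 1) 0 < v then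
        dd_adv edges v (b + 1) fuel
      else b
  | b, 0 => b

def discretize_data_alt (data : List Int) (k : Int) : List Int × List Int :=
  let bin_edges := dd_edges data k
  let n : Int := data.length
  let order := PySem.List.sorted (PySem.List.pyRange 0 n 1) (fun i => PySem.List.pyGetD data i 0) false
  let st := order.foldl (fun (st : Nat × List Int) i =>
      let v := PySem.List.pyGetD data i 0
      let b := dd_adv bin_edges v st.1 bin_edges.length
      (b, PySem.List.pySetD st.2 i ((b : Int) + 1)))
    ((0 : Nat), List.replicate data.length (0 : Int))
  (st.2, bin_edges)

-- ===== PRECONDITION & SPEC =====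
-- A raises ValueError when k <= 0 or k > len(data); Pre_ admits exactly the inputs where A returns.
def Pre_discretize_data (data : List Int) (k : Int) : Prop := 1 ≤ k ∧ k ≤ (data.length : Int)
instance (data : List Int) (k : Int) : Decidable (Pre_discretize_data data k) := by unfold Pre_discretize_data; infer_instance
def pvWitness_discretize_data : List Int × Int := ([3, 1, 2, 2], 2)

def Spec_discretize_data (data : List Int) (k : Int) (out : List Int × List Int) : Prop := out = discretize_data_alt data k
instance (data : List Int) (k : Int) (out : List Int × List Int) : Decidable (Spec_discretize_data data k out) := by unfold Spec_discretize_data; infer_instance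

-- ===== CLAIM (what is proved, stated in full; the proofs are below) =====
def Claim_equal_discretize_data : Prop := ∀ (data : List Int) (k : Int), Dom_discretize_data data k → Pre_discretize_data data k → Spec_discretize_data data k (discretize_data data k)

-- ===== LEMMAS AND PROOFS =====

-- In a ≤-sorted list, the elements `< v` form a prefix of length `countP (· < v)`.
theorem pv_countP_lt_spec (v : Int) : ∀ (l : List Int), l.Pairwise (· ≤ ·) →
    ∀ (idx : Nat) (h : idx < l.length),
      (idx < l.countP (fun e => decide (e < v)) → l[idx] < v) ∧
      (l.countP (fun e => decide (e < v)) ≤ idx → v ≤ l[idx]) := by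
  intro l
  induction l with
  | nil => intro _ idx h; simp at h
  | cons a t ih =>
    intro hp idx h
    have hat := (List.pairwise_cons.mp hp).1
    have hpt := (List.pairwise_cons.mp hp).2
    by_cases hav : a < v
    · have hc : (a :: t).countP (fun e => decide (e < v)) = t.countP (fun e => decide (e < v)) + 1 := by
        simp [hav]
      cases idx with
      | zero => exact ⟨fun _ => hav, by simp [hc]⟩
      | succ m =>
        have hm : m < t.length := by simpa using h
        have := ih hpt m hm
        simp only [List.getElem_cons_succ, hc]
        exact ⟨fun hlt => this.1 (by omega), fun hle => this.2 (by omega)⟩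
    · have hva : v ≤ a := by omega
      have hc : (a :: t).countP (fun e => decide (e < v)) = 0 := by
        simp only [List.countP_eq_zero]
        intro e he
        simp only [List.mem_cons] at he
        rcases he with rfl | he
        · simp; omega
        · have := hat e he; simp; omega
      cases idx with
      | zero => exact ⟨by simp [hc], fun _ => hva⟩
      | succ m =>
        have hm : m < t.length := by simpa using h
        simp only [List.getElem_cons_succ, hc]
        refine ⟨by omega, fun _ => le_trans hva (hat _ (t.getElem_mem hm))⟩

-- A's first-match scan over a sorted edge list returns position (first window containing v) + 1,
-- which is 1 + (number of interior edges strictly below v).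
theorem pv_scanA_eq (v : Int) : ∀ (tail : List Int) (e0 : Int) (j : Int)
    (_ : (e0 :: tail).Pairwise (· ≤ ·)) (_ : e0 ≤ v) (htail : tail ≠ [])
    (_ : v ≤ tail.getLast htail),
    dd_scanA v j (e0 :: tail) = some (j + 1 + (tail.countP (fun e => decide (e < v)) : Int)) := by
  intro tail
  induction tail with
  | nil => intro _ _ _ _ htail _; exact absurd rfl htail
  | cons e1 rest ih =>
    intro e0 j hp h0 htail hlast
    by_cases h1 : v ≤ e1
    · have hc : (e1 :: rest).countP (fun e => decide (e < v)) = 0 := by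
        simp only [List.countP_eq_zero]
        intro e he
        simp only [List.mem_cons] at he
        have h1r := (List.pairwise_cons.mp (List.pairwise_cons.mp hp).2).1
        rcases he with rfl | he
        · simp; omega
        · have := h1r e he; simp; omega
      simp [dd_scanA, h0, h1, hc]
    · have he1 : e1 < v := by omega
      cases rest with
      | nil =>
        simp only [List.getLast_singleton] at hlast
        omega
      | cons r rs =>
        have hne : (r :: rs) ≠ [] := by simp
        have hlast' : v ≤ (r :: rs).getLast hne := by
          rwa [List.getLast_cons hne] at hlast
        have := ih e1 (j + 1) (List.pairwise_cons.mp hp).2 (le_of_lt he1) hne hlast'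
        have hc : ((e1 :: r :: rs).countP (fun e => decide (e < v)) : Int)
            = ((r :: rs).countP (fun e => decide (e < v)) : Int) + 1 := by
          simp [List.countP_cons, he1]
        rw [show dd_scanA v j (e0 :: e1 :: r :: rs)
              = dd_scanA v (j + 1) (e1 :: r :: rs) from by
            simp [dd_scanA]; omega]
        rw [this, hc]
        congr 1
        ring

-- the countP target of the sweep never exceeds len - 2 (the last edge is ≥ v)
theorem pv_c_le (E : List Int) (v : Int) (hp : E.Pairwise (· ≤ ·)) (h2 : 2 ≤ E.length)
    (hE : E ≠ []) (hlast : v ≤ E.getLast hE) :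
    (E.drop 1).countP (fun e => decide (e < v)) ≤ E.length - 2 := by
  by_contra hgt
  push_neg at hgt
  have htlen : (E.drop 1).length = E.length - 1 := by simp
  have htp : (E.drop 1).Pairwise (· ≤ ·) := hp.sublist (List.drop_sublist 1 E)
  have hidx : E.length - 2 < (E.drop 1).length := by omega
  have hlt := (pv_countP_lt_spec v (E.drop 1) htp (E.length - 2) hidx).1 (by omega)
  have hgl : (E.drop 1)[E.length - 2]'hidx = E[E.length - 1]'(by omega) := by
    simp only [List.getElem_drop]
    congr 1
    omega
  have hgl2 : E.getLast hE = E[E.length - 1]'(by omega) := List.getLast_eq_getElem hE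
  rw [hgl] at hlt
  rw [hgl2] at hlast
  omega

-- B's while-loop: started at any b below the target count, it stops exactly at
-- c = (number of interior edges strictly below v)
theorem pv_adv_eq (E : List Int) (v : Int) (hp : E.Pairwise (· ≤ ·)) (h2 : 2 ≤ E.length)
    (hE : E ≠ []) (hlast : v ≤ E.getLast hE) :
    ∀ (fuel b : Nat), b ≤ (E.drop 1).countP (fun e => decide (e < v)) →
      (E.drop 1).countP (fun e => decide (e < v)) ≤ b + fuel →
      dd_adv E v b fuel = (E.drop 1).countP (fun e => decide (e < v)) := by
  have hc2 := pv_c_le E v hp h2 hE hlast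
  have htp : (E.drop 1).Pairwise (· ≤ ·) := hp.sublist (List.drop_sublist 1 E)
  have htlen : (E.drop 1).length = E.length - 1 := by simp
  intro fuel
  induction fuel with
  | zero => intro b hb hf; simp only [dd_adv]; omega
  | succ m ih =>
    intro b hb hf
    have hget : ∀ (hblen : b < (E.drop 1).length),
        PySem.List.pyGetD E ((b : Int) + 1) 0 = (E.drop 1)[b]'hblen := by
      intro hblen
      have h1 : ((b : Int) + 1) = ((b + 1 : Nat) : Int) := by push_cast; ring
      rw [h1, PySem.List.pyGetD_natCast]
      rw [List.getD_eq_getElem _ _ (by omega)]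
      simp only [List.getElem_drop]
      congr 1
      omega
    by_cases hbc : b < (E.drop 1).countP (fun e => decide (e < v))
    · have hblen : b < (E.drop 1).length := by omega
      have hcond : ((b : Int) < PySem.List.len E - 2 ∧
          PySem.List.pyGetD E ((b : Int) + 1) 0 < v) := by
        constructor
        · rw [PySem.List.len_eq]; omega
        · rw [hget hblen]
          exact (pv_countP_lt_spec v (E.drop 1) htp b hblen).1 hbc
      rw [show dd_adv E v b (m + 1) = dd_adv E v (b + 1) m from by
        simp only [dd_adv]; rw [if_pos hcond]]
      exact ih (b + 1) (by omega) (by omega)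
    · have hbe : b = (E.drop 1).countP (fun e => decide (e < v)) := by omega
      have hcond : ¬ ((b : Int) < PySem.List.len E - 2 ∧
          PySem.List.pyGetD E ((b : Int) + 1) 0 < v) := by
        rintro ⟨hlen, hv⟩
        rw [PySem.List.len_eq] at hlen
        have hblen : b < (E.drop 1).length := by omega
        rw [hget hblen] at hv
        have := (pv_countP_lt_spec v (E.drop 1) htp b hblen).2 (by omega)
        omega
      simp only [dd_adv]
      rw [if_neg hcond]
      omega

-- a fold of in-range scatter-writes, read back pointwise
theorem pv_scatter (f : Int → Int) : ∀ (l : List Int) (bins : List Int),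
    (∀ i ∈ l, 0 ≤ i ∧ i < (bins.length : Int)) →
    ((l.foldl (fun bs i => PySem.List.pySetD bs i (f i)) bins).length = bins.length ∧
     ∀ (j : Nat), (l.foldl (fun bs i => PySem.List.pySetD bs i (f i)) bins)[j]? =
       if (j : Int) ∈ l then some (f j) else bins[j]?) := by
  intro l
  induction l with
  | nil => intro bins _; simp
  | cons i rest ih =>
    intro bins hb
    have hi := hb i (by simp)
    have hset : PySem.List.pySetD bins i (f i) = bins.set i.toNat (f i) :=
      PySem.List.pySetD_of_nonneg bins (f i) hi.1
    have hlen' : (PySem.List.pySetD bins i (f i)).length = bins.length := by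
      rw [hset]; simp
    have hb' : ∀ i' ∈ rest, 0 ≤ i' ∧ i' < ((PySem.List.pySetD bins i (f i)).length : Int) := by
      intro i' hi'; rw [hlen']; exact hb i' (by simp [hi'])
    obtain ⟨ihlen, ihget⟩ := ih (PySem.List.pySetD bins i (f i)) hb'
    refine ⟨by simp only [List.foldl_cons]; rw [ihlen, hlen'], ?_⟩
    intro j
    simp only [List.foldl_cons]
    rw [ihget j]
    by_cases hjr : (j : Int) ∈ rest
    · simp [hjr]
    · by_cases hji : (j : Int) = i
      · have hjmem : (j : Int) ∈ i :: rest := by simp [hji]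
        have hjt : i.toNat = j := by omega
        have hjlen : j < bins.length := by omega
        rw [if_neg hjr, if_pos hjmem, hset, hjt]
        simp [hjlen, hji]
      · rw [if_neg hjr, if_neg (by simp [hji, hjr]), hset]
        have hne : i.toNat ≠ j := by omega
        simp [hne]

-- B's sweep over the value-sorted index list writes, at each index, a value that
-- depends on that index alone; the stateful fold collapses to a pure scatter fold
theorem pv_foldB (data E : List Int) (hp : E.Pairwise (· ≤ ·)) (h2 : 2 ≤ E.length)
    (hE : E ≠ []) (hl : ∀ v ∈ data, v ≤ E.getLast hE) :
    ∀ (l : List Int) (b : Nat) (bins : List Int),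
      (∀ i ∈ l, 0 ≤ i ∧ i < (data.length : Int)) →
      l.Pairwise (fun a b' => PySem.List.pyGetD data a 0 ≤ PySem.List.pyGetD data b' 0) →
      (∀ i ∈ l, b ≤ (E.drop 1).countP (fun e => decide (e < PySem.List.pyGetD data i 0))) →
      (l.foldl (fun (st : Nat × List Int) i =>
          (dd_adv E (PySem.List.pyGetD data i 0) st.1 E.length,
           PySem.List.pySetD st.2 i ((dd_adv E (PySem.List.pyGetD data i 0) st.1 E.length : Int) + 1)))
        (b, bins)).2
      = l.foldl (fun bs i => PySem.List.pySetD bs i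
          (((E.drop 1).countP (fun e => decide (e < PySem.List.pyGetD data i 0)) : Int) + 1)) bins := by
  intro l
  induction l with
  | nil => intro b bins _ _ _; rfl
  | cons i rest ih =>
    intro b bins hmem hsorted hb
    have hir := hmem i (by simp)
    have hkeymem : PySem.List.pyGetD data i 0 ∈ data := by
      apply PySem.List.pyGetD_mem
      constructor <;> omega
    have hvlast := hl _ hkeymem
    have hadv : dd_adv E (PySem.List.pyGetD data i 0) b E.length
        = (E.drop 1).countP (fun e => decide (e < PySem.List.pyGetD data i 0)) := by
      apply pv_adv_eq E _ hp h2 hE hvlast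
      · exact hb i (by simp)
      · have := pv_c_le E _ hp h2 hE hvlast; omega
    simp only [List.foldl_cons, hadv]
    apply ih
    · intro i' hi'; exact hmem i' (by simp [hi'])
    · exact (List.pairwise_cons.mp hsorted).2
    · intro i' hi'
      have hkey : PySem.List.pyGetD data i 0 ≤ PySem.List.pyGetD data i' 0 :=
        (List.pairwise_cons.mp hsorted).1 i' hi'
      apply List.countP_mono_left
      intro e _ he
      simp only [decide_eq_true_eq] at he ⊢
      omega

-- shape and order facts about the shared edge list
theorem pv_edges_facts (data : List Int) (k : Int) (hk1 : 1 ≤ k) (hk2 : k ≤ (data.length : Int)) :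
    ∃ (e0 : Int) (tail : List Int) (htne : tail ≠ []),
      dd_edges data k = e0 :: tail ∧
      (e0 :: tail).Pairwise (· ≤ ·) ∧
      ∀ v ∈ data, e0 ≤ v ∧ v ≤ tail.getLast htne := by
  have hn1 : 1 ≤ (data.length : Int) := le_trans hk1 hk2
  have hdsl : (PySem.List.sorted data (fun x => x) false).length = data.length :=
    PySem.List.length_sorted data _ _
  set ds := PySem.List.sorted data (fun x => x) false with hds
  have hdsne : ds ≠ [] := by
    intro h; rw [h] at hdsl; simp at hdsl; omega
  set interval := PySem.Int.floordiv (data.length : Int) k with hintd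
  have hkpos : (0 : Int) < k := by omega
  have hint1 : 1 ≤ interval := by
    rw [hintd]
    exact (PySem.Int.le_floordiv_iff_mul_le hkpos).mpr (by omega)
  have hintk : interval * k ≤ (data.length : Int) := by
    rw [hintd]
    exact (PySem.Int.le_floordiv_iff_mul_le hkpos).mp (le_refl _)
  -- compare two in-range positions of the sorted list
  have hmono : ∀ (p q : Nat) (hpq : p ≤ q) (hq : q < ds.length), ds[p]'(by omega) ≤ ds[q]'hq := by
    intro p q hpq hq
    exact PySem.List.key_sorted_getElem_mono data (fun x => x) hpq hq
  have hcmp : ∀ (a b : Int), 0 ≤ a → a ≤ b → b < (data.length : Int) →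
      PySem.List.pyGetD ds a 0 ≤ PySem.List.pyGetD ds b 0 := by
    intro a b ha hab hb
    rw [PySem.List.pyGetD_eq_getElem ds 0 ha (by omega),
        PySem.List.pyGetD_eq_getElem ds 0 (by omega) (by omega)]
    exact hmono a.toNat b.toNat (by omega) (by omega)
  have hlast_eq : PySem.List.pyGetD ds (-1) 0 = PySem.List.pyGetD ds ((data.length : Int) - 1) 0 := by
    rw [PySem.List.pyGetD_neg_one ds 0 hdsne,
        PySem.List.pyGetD_eq_getElem ds 0 (by omega) (by omega), List.getLast_eq_getElem]
    congr 1
    omega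
  have hmidrange : ∀ (i : Int), 1 ≤ i → i < k →
      0 ≤ i * interval - 1 ∧ i * interval - 1 < (data.length : Int) - 1 := by
    intro i h1 h2
    constructor
    · nlinarith
    · have h4 : i * interval ≤ (k - 1) * interval :=
        mul_le_mul_of_nonneg_right (by omega) (by omega)
      nlinarith
  refine ⟨PySem.List.pyGetD ds 0 0,
    ((PySem.List.pyRange 1 k 1).map (fun i => PySem.List.pyGetD ds (i * interval - 1) 0))
      ++ [PySem.List.pyGetD ds (-1) 0], by simp, ?_, ?_, ?_⟩
  · rw [dd_edges]
    rw [PySem.List.foldl_append_singleton_eq_map]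
    rw [← hds, ← hintd]
    rfl
  · -- Pairwise ≤ of the edge list
    rw [List.pairwise_cons]
    constructor
    · intro y hy
      simp only [List.mem_append, List.mem_map, List.mem_singleton] at hy
      rcases hy with ⟨i, hi, rfl⟩ | rfl
      · obtain ⟨hi1, hi2⟩ := PySem.List.mem_pyRange_one.mp hi
        obtain ⟨hr1, hr2⟩ := hmidrange i hi1 hi2
        exact hcmp 0 (i * interval - 1) le_rfl hr1 (by omega)
      · rw [hlast_eq]
        exact hcmp 0 _ le_rfl (by omega) (by omega)
    · rw [List.pairwise_append]
      refine ⟨?_, by simp, ?_⟩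
      · rw [List.pairwise_map]
        refine (PySem.List.pairwise_lt_pyRange_one (a := 1) (b := k)).imp_of_mem ?_
        intro a b ha hb hab
        obtain ⟨ha1, ha2⟩ := PySem.List.mem_pyRange_one.mp ha
        obtain ⟨hb1, hb2⟩ := PySem.List.mem_pyRange_one.mp hb
        obtain ⟨har1, _⟩ := hmidrange a ha1 ha2
        obtain ⟨hbr1, hbr2⟩ := hmidrange b hb1 hb2
        refine hcmp _ _ har1 ?_ (by omega)
        have := mul_le_mul_of_nonneg_right (show a ≤ b by omega) (show (0:Int) ≤ interval by omega)
        omega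
      · intro a ha b hb
        simp only [List.mem_map] at ha
        simp only [List.mem_singleton] at hb
        obtain ⟨i, hi, rfl⟩ := ha
        obtain ⟨hi1, hi2⟩ := PySem.List.mem_pyRange_one.mp hi
        obtain ⟨hr1, hr2⟩ := hmidrange i hi1 hi2
        subst hb
        rw [hlast_eq]
        exact hcmp _ _ hr1 (by omega) (by omega)
  · -- every data value lies between the first and the last edge
    intro v hv
    have hvds : v ∈ ds := by rw [hds, PySem.List.mem_sorted]; exact hv
    obtain ⟨j, hj, hvj⟩ := List.mem_iff_getElem.mp hvds
    have hvj' : v = PySem.List.pyGetD ds (j : Int) 0 := by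
      rw [PySem.List.pyGetD_eq_getElem ds 0 (by omega) (by omega), ← hvj]
      congr 1
    constructor
    · rw [hvj']
      exact hcmp 0 j le_rfl (by omega) (by omega)
    · have hconcat : ∀ (l : List Int) (x : Int) (h : l ++ [x] ≠ []), (l ++ [x]).getLast h = x := by
        intro l x h
        rw [List.getLast_append]
        simp
      rw [hconcat, hlast_eq, hvj']
      exact hcmp j _ (by omega) (by omega) (by omega)

-- ===== VERDICT (by name: the statement is the Claim_ definition above) =====
theorem discretize_data_spec : Claim_equal_discretize_data := by
  intro data k _hdom hpre
  obtain ⟨hk1, hk2⟩ := hpre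
  obtain ⟨e0, tail, htne, hEeq, hpair, hbounds⟩ := pv_edges_facts data k hk1 hk2
  have hcne : (e0 :: tail) ≠ [] := by simp
  have h2le : 2 ≤ (e0 :: tail).length := by
    cases tail with
    | nil => exact absurd rfl htne
    | cons a t => simp
  have hlastd : ∀ v ∈ data, v ≤ (e0 :: tail).getLast hcne := by
    intro v hv
    rw [List.getLast_cons htne]
    exact (hbounds v hv).2
  unfold Spec_discretize_data discretize_data discretize_data_alt
  simp only []
  rw [hEeq]
  apply Prod.ext_iff.mpr
  refine ⟨?_, rfl⟩
  have hA : data.foldl (fun acc v => match dd_scanA v 0 (e0 :: tail) with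
      | some r => acc ++ [r] | none => acc) ([] : List Int)
      = data.map (fun v => 0 + 1 + (tail.countP (fun e => decide (e < v)) : Int)) := by
    rw [PySem.List.foldl_congr_mem data _
        (fun acc v => acc ++ [0 + 1 + (tail.countP (fun e => decide (e < v)) : Int)]) []
        ?_]
    · rw [PySem.List.foldl_append_singleton_eq_map]
      simp
    · intro acc v hv
      rw [pv_scanA_eq v tail e0 0 hpair (hbounds v hv).1 htne (hbounds v hv).2]
  have hordmem : ∀ i ∈ PySem.List.sorted (PySem.List.pyRange 0 (data.length : Int) 1)
      (fun i => PySem.List.pyGetD data i 0) false, 0 ≤ i ∧ i < (data.length : Int) := by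
    intro i hi
    rw [PySem.List.mem_sorted] at hi
    exact PySem.List.mem_pyRange_one.mp hi
  have hordpair := PySem.List.sorted_pairwise (PySem.List.pyRange 0 (data.length : Int) 1)
      (fun i => PySem.List.pyGetD data i 0)
  have hfold := pv_foldB data (e0 :: tail) hpair h2le hcne hlastd
      (PySem.List.sorted (PySem.List.pyRange 0 (data.length : Int) 1)
        (fun i => PySem.List.pyGetD data i 0) false)
      0 (List.replicate data.length 0) hordmem hordpair (fun i _ => Nat.zero_le _)
  rw [hA, hfold]
  simp only [List.drop_succ_cons, List.drop_zero]
  obtain ⟨hslen, hsget⟩ := pv_scatter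
      (fun i => ((tail.countP (fun e => decide (e < PySem.List.pyGetD data i 0)) : Int) + 1))
      (PySem.List.sorted (PySem.List.pyRange 0 (data.length : Int) 1)
        (fun i => PySem.List.pyGetD data i 0) false)
      (List.replicate data.length 0)
      (by intro i hi
          have := hordmem i hi
          simpa using this)
  apply List.ext_getElem?
  intro j
  rw [hsget j]
  by_cases hj : j < data.length
  · have hmemo : ((j : Nat) : Int) ∈ PySem.List.sorted (PySem.List.pyRange 0 (data.length : Int) 1)
        (fun i => PySem.List.pyGetD data i 0) false := by
      rw [PySem.List.mem_sorted, PySem.List.mem_pyRange_one]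
      constructor <;> omega
    rw [if_pos hmemo, List.getElem?_map, List.getElem?_eq_getElem hj]
    have hkey : PySem.List.pyGetD data ((j : Nat) : Int) 0 = data[j] := by
      rw [PySem.List.pyGetD_eq_getElem data 0 (by omega) (by omega)]
      congr 1
    rw [hkey]
    simp only [Option.map_some]
    congr 1
    omega
  · have hmemo : ¬ ((j : Nat) : Int) ∈ PySem.List.sorted (PySem.List.pyRange 0 (data.length : Int) 1)
        (fun i => PySem.List.pyGetD data i 0) false := by
      rw [PySem.List.mem_sorted, PySem.List.mem_pyRange_one]
      omega
    rw [if_neg hmemo, List.getElem?_map]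
    have h1 : data[j]? = none := List.getElem?_eq_none (by omega)
    have h2 : (List.replicate data.length (0 : Int))[j]? = none :=
      List.getElem?_eq_none (by simp; omega)
    rw [h1, h2]
    rfl
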